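-- pv_equiv track=rewrite | github.com/slaclab/pydm-converter-tool | pydmconverter/edm/parser.py | remove_prepended_index
-- ===== SOURCE A (Python) =====
-- def remove_prepended_index(lines: list[str]) -> list[str]:
--     """Removes the prepended indices from the given multi-line property value
--
--     Parameters
--     ----------
--     lines : list[str]
--         List of lines in a multi-line property value to remove the prepended indices from
--
--     Returns
--     -------
--     list[str]
--         Lines of the multi-line property value with the prepended indices removed
--     """
--     indices = []
--     values = []
--
--     def check_sequential(indices):
--         """Check if the list of indices is sequential starting from 0"""
--         return indices == list(range(len(indices)))
--
--     for line in lines: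
--         try:
--             k, v = line.split(maxsplit=1)
--             indices.append(int(k))
--             values.append(v.strip(' "'))
--         except ValueError:
--             return lines
--
--     if not check_sequential(indices):
--         return lines
--     return values
-- ===== SOURCE B (Python) =====
-- def remove_prepended_index(lines: list[str]) -> list[str]:
--     """Single reversed pass: walk the lines back-to-front with a countdown of
--     the expected index, consing cleaned values onto the front of the result;
--     no index list, no range comparison, no helper function."""
--     out = []
--     i = len(lines)
--     for line in reversed(lines):
--         i -= 1
--         try:
--             k, v = line.split(maxsplit=1)
--             n = int(k)
--         except ValueError:
--             return lines
--         if n != i: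
--             return lines
--         out = [v.strip(' "')] + out
--     return out
-- ===== Notes on version B (the rewrite author's own statement) =====
-- stated objective: alternative
-- what changed: Replaces A's two staged passes (append-building an index list and a values list, then comparing the index list to list(range(len(indices)))) with a single reversed traversal that counts the expected index down from len(lines) and conses each cleaned value onto the front of the result, returning lines immediately on a parse failure or index mismatch; no indices list, no range check, no helper.
import Mathlib
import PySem

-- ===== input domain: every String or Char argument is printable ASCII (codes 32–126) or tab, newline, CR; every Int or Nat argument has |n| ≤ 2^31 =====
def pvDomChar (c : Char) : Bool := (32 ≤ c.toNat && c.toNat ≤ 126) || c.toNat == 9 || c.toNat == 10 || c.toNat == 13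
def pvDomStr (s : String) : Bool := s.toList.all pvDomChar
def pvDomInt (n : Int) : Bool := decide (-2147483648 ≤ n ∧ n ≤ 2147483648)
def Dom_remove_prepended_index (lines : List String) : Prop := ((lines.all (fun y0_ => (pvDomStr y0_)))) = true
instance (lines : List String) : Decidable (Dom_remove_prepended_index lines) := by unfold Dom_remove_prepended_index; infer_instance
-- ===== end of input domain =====

-- One honest line: B replaces A's two staged passes (append-built index/value
-- lists plus a range comparison) by one reversed traversal with a countdown
-- expected index, consing values onto the front; same return value.

-- ===== PORT A =====
-- per-line body of A's try: k, v = line.split(maxsplit=1); int(k); v.strip(' "')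
def pvParseLine (line : String) : Option (Int × String) :=
  match PySem.Str.split₀Max line 1 with
  | [k, v] =>
    match PySem.Int.ofStr? k with
    | some n => some (n, PySem.Str.stripChars v " \"")
    | none => none
  | _ => none

-- the for-loop of A: appends to indices and values, ValueError → none (early return lines)
def pvGoA (rest : List String) (indices : List Int) (values : List String) :
    Option (List Int × List String) :=
  match rest with
  | [] => some (indices, values)
  | line :: t =>
    match pvParseLine line with
    | some (n, v) => pvGoA t (indices ++ [n]) (values ++ [v])
    | none => none

def remove_prepended_index (lines : List String) : List String :=
  match pvGoA lines [] [] with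
  | none => lines
  | some (indices, values) =>
    -- check_sequential: indices == list(range(len(indices)))
    if indices = PySem.List.pyRange 0 (indices.length : Int) 1 then values else lines

-- ===== PORT B =====
-- B's reversed for-loop: i counts down; cons the cleaned value onto the front of out;
-- none = B's early 'return lines' (parse failure or index mismatch)
def pvGoB (rest : List String) (i : Int) (out : List String) : Option (List String) :=
  match rest with
  | [] => some out
  | line :: t =>
    match PySem.Str.split₀Max line 1 with
    | [k, v] =>
      match PySem.Int.ofStr? k with
      | some n =>
        if n ≠ i - 1 then none
        else pvGoB t (i - 1) (PySem.Str.stripChars v " \"" :: out)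
      | none => none
    | _ => none

def remove_prepended_index_alt (lines : List String) : List String :=
  match pvGoB lines.reverse (lines.length : Int) [] with
  | none => lines
  | some out => out

-- ===== PRECONDITION & SPEC =====
def Spec_remove_prepended_index (lines : List String) (out : List String) : Prop := out = remove_prepended_index_alt lines
instance (lines : List String) (out : List String) : Decidable (Spec_remove_prepended_index lines out) := by unfold Spec_remove_prepended_index; infer_instance

-- ===== CLAIM (what is proved, stated in full; the proofs are below) =====
def Claim_equal_remove_prepended_index : Prop := ∀ (lines : List String), Dom_remove_prepended_index lines → Spec_remove_prepended_index lines (remove_prepended_index lines)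

-- ===== LEMMAS AND PROOFS =====

-- proof-only reference recursion: forward scan demanding index j, j+1, … (used on both sides)
def pvSeq (j : Int) (rest : List String) : Option (List String) :=
  match rest with
  | [] => some []
  | l :: t =>
    match pvParseLine l with
    | some (n, v) => if n ≠ j then none else (pvSeq (j + 1) t).map (fun tail => v :: tail)
    | none => none

-- pvGoB's head step, phrased through pvParseLine
theorem pvGoB_cons (i : Int) (l : String) (t : List String) (out : List String) :
    pvGoB (l :: t) i out
      = match pvParseLine l with
        | some (n, v) => if n ≠ i - 1 then none else pvGoB t (i - 1) (v :: out)
        | none => none := by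
  simp only [pvGoB, pvParseLine]
  cases PySem.Str.split₀Max l 1 with
  | nil => rfl
  | cons a s =>
    cases s with
    | nil => rfl
    | cons b s' =>
      cases s' with
      | nil => cases h : PySem.Int.ofStr? a <;> simp [h]
      | cons c s'' => rfl

-- pvSeq over an appended last line: parse it and demand index j + length of the prefix
theorem pvSeq_append_one (j : Int) (ys : List String) (l : String) :
    pvSeq j (ys ++ [l])
      = (pvSeq j ys).bind (fun vs =>
          match pvParseLine l with
          | some (n, v) => if n = j + (ys.length : Int) then some (vs ++ [v]) else none
          | none => none) := by
  induction ys generalizing j with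
  | nil =>
    simp only [List.nil_append, pvSeq, List.length_nil]
    cases pvParseLine l with
    | none => rfl
    | some p =>
      obtain ⟨n, v⟩ := p
      by_cases hn : n = j <;> simp [hn]
  | cons y ys ih =>
    simp only [List.cons_append, pvSeq]
    cases pvParseLine y with
    | none => rfl
    | some p =>
      obtain ⟨n, v⟩ := p
      by_cases hn : n = j
      · simp only [hn, if_neg (show ¬(j ≠ j) from by simp), ih (j + 1)]
        cases pvSeq (j + 1) ys with
        | none => simp
        | some vs =>
          simp only [Option.map_some, Option.bind_some]
          cases pvParseLine l with
          | none => simp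
          | some q =>
            obtain ⟨m, w⟩ := q
            have harith : (m = j + 1 + (ys.length : Int)) ↔ (m = j + ((ys.length : Int) + 1)) := by omega
            by_cases hm : m = j + 1 + (ys.length : Int) <;>
              simp [hm, List.length_cons] <;> omega
      · simp [hn]

-- B's reversed countdown loop computes the forward reference scan (values consed in front of out)
theorem pvGoB_eq_pvSeq (xs : List String) (j : Int) (out : List String) :
    pvGoB xs.reverse (j + (xs.length : Int)) out = (pvSeq j xs).map (fun vs => vs ++ out) := by
  induction xs using List.reverseRecOn generalizing out with
  | nil => simp [pvGoB, pvSeq]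
  | append_singleton ys l ih =>
    rw [List.reverse_append, List.reverse_singleton, List.singleton_append, pvGoB_cons,
      pvSeq_append_one]
    cases pvParseLine l with
    | none => simp
    | some p =>
      obtain ⟨n, v⟩ := p
      have h3 : j + ((ys.length : Int) + 1) - 1 = j + (ys.length : Int) := by ring
      by_cases hn : n = j + (ys.length : Int)
      · cases hs : pvSeq j ys with
        | none =>
          have hi := ih (v :: out)
          rw [hs] at hi
          simp [h3, hi, hn]
        | some vs =>
          have hi := ih (v :: out)
          rw [hs] at hi
          simp [h3, hi, hn]
      · cases pvSeq j ys <;> simp [h3, hn]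

-- whatever pvGoA returns extends its starting indices list
theorem pvGoA_prefix (rest : List String) (ind : List Int) (vals : List String)
    (ind' : List Int) (vals' : List String)
    (h : pvGoA rest ind vals = some (ind', vals')) : ∃ ks, ind' = ind ++ ks := by
  induction rest generalizing ind vals with
  | nil =>
    simp [pvGoA] at h
    exact ⟨[], by simp [h.1]⟩
  | cons l t ih =>
    simp only [pvGoA] at h
    cases hp : pvParseLine l with
    | none => simp [hp] at h
    | some p =>
      rw [hp] at h
      obtain ⟨ks, hks⟩ := ih _ _ h
      exact ⟨p.1 :: ks, by simpa using hks⟩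

-- core invariant on A's side: after a sequential prefix 0..i-1, A's continuation
-- yields vals ++ (the forward reference scan), or the fallback L on failure
theorem pvGoA_eq_pvSeq (rest : List String) (i : Nat) (vals : List String) (L : List String) :
    (match pvGoA rest (PySem.List.pyRange 0 (i : Int) 1) vals with
     | none => L
     | some (ind, vs) =>
       if ind = PySem.List.pyRange 0 (ind.length : Int) 1 then vs else L)
    = (match pvSeq (i : Int) rest with
       | none => L
       | some vs => vals ++ vs) := by
  induction rest generalizing i vals with
  | nil =>
    simp [pvGoA, pvSeq, PySem.List.length_pyRange_one]
  | cons l t ih =>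
    simp only [pvGoA, pvSeq]
    cases hp : pvParseLine l with
    | none => rfl
    | some p =>
      obtain ⟨n, v⟩ := p
      by_cases hn : n = (i : Int)
      · subst hn
        have hr : PySem.List.pyRange 0 (i : Int) 1 ++ [(i : Int)]
            = PySem.List.pyRange 0 ((i + 1 : Nat) : Int) 1 := by
          have := (PySem.List.pyRange_one_succ_right (a := 0) (b := (i : Int)) (by positivity)).symm
          push_cast
          simpa using this
        simp only [hr, if_neg (show ¬((i : Int) ≠ (i : Int)) from by simp)]
        have := ih (i + 1) (vals ++ [v])
        push_cast at this ⊢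
        rw [this]
        cases pvSeq ((i : Int) + 1) t <;> simp
      · simp only [if_pos hn]
        cases hA : pvGoA t (PySem.List.pyRange 0 (i : Int) 1 ++ [n]) (vals ++ [v]) with
        | none => rfl
        | some q =>
          obtain ⟨ind, vs⟩ := q
          obtain ⟨ks, hks⟩ := pvGoA_prefix _ _ _ _ _ hA
          have hne : ind ≠ PySem.List.pyRange 0 (ind.length : Int) 1 := by
            intro hEq
            have hlen : i < ind.length := by
              subst hks
              simp [PySem.List.length_pyRange_one]
            have h1 : ind[i]'hlen = n := by
              subst hks
              rw [List.getElem_append_left (by simp [PySem.List.length_pyRange_one])]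
              rw [List.getElem_append_right (by simp [PySem.List.length_pyRange_one])]
              simp [PySem.List.length_pyRange_one]
            have h2 : ind[i]'hlen = (i : Int) := by
              rw [List.getElem_of_eq hEq, PySem.List.getElem_pyRange_one]
              simp
            exact hn (h1.symm.trans h2)
          simp [hne]

-- ===== VERDICT (by name: the statement is the Claim_ definition above) =====
theorem remove_prepended_index_spec : Claim_equal_remove_prepended_index := by
  intro lines _
  unfold Spec_remove_prepended_index remove_prepended_index remove_prepended_index_alt
  have hA := pvGoA_eq_pvSeq lines 0 [] lines
  rw [show PySem.List.pyRange 0 ((0:Nat):Int) 1 = [] from by decide] at hA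
  have hB := pvGoB_eq_pvSeq lines 0 []
  simp only [zero_add] at hB
  rw [hA, hB]
  cases pvSeq 0 lines <;> simp
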